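-- pv_equiv track=rewrite | github.com/drizztSun/common_project | PythonLeetcode/leetcodeM/1066_campusBikesII.py | doit_bfs_heap
-- ===== SOURCE A (Python) =====
-- def doit_bfs_heap(workers, bikes):
--     import heapq
--
--     def dis(i, j):
--         return abs(workers[i][0] - bikes[j][0]) + abs(workers[i][1] - bikes[j][1])
--
--     h = [[0, 0, 0]]
--     seen = set()
--
--     while True:
--         cost, i, taken = heapq.heappop(h)
--
--         if (i, taken) in seen: continue
--         seen.add((i, taken))
--
--         if i == len(workers):
--             return cost
--
--         for j in range(len(bikes)):
--             if taken & (1 << j) == 0: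
--                 heapq.heappush(h, [cost + dis(i, j), i + 1, taken | (1 << j)])
-- ===== SOURCE B (Python) =====
-- def doit_bfs_heap(workers, bikes):
--     # top-down memoized DP over the bitmask of taken bikes (worker index = popcount)
--     W, nb = len(workers), len(bikes)
--     memo = {}
--
--     def best(i, taken):
--         if i == W:
--             return 0
--         if taken in memo:
--             return memo[taken]
--         res = None
--         for j in range(nb):
--             if taken & (1 << j) == 0:
--                 sub = best(i + 1, taken | (1 << j))
--                 if sub is not None:
--                     c = sub + abs(workers[i][0] - bikes[j][0]) + abs(workers[i][1] - bikes[j][1])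
--                     if res is None or c < res:
--                         res = c
--         memo[taken] = res
--         return res
--
--     return best(0, 0)
-- ===== Notes on version B (the rewrite author's own statement) =====
-- stated objective: faster
-- what changed: Replaces A's best-first (Dijkstra-style) search over (worker, taken-bikes) states with a heap and a seen-set by a top-down memoized bitmask DP (worker index = popcount of the mask) that solves each mask exactly once with no priority queue.
import Mathlib
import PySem

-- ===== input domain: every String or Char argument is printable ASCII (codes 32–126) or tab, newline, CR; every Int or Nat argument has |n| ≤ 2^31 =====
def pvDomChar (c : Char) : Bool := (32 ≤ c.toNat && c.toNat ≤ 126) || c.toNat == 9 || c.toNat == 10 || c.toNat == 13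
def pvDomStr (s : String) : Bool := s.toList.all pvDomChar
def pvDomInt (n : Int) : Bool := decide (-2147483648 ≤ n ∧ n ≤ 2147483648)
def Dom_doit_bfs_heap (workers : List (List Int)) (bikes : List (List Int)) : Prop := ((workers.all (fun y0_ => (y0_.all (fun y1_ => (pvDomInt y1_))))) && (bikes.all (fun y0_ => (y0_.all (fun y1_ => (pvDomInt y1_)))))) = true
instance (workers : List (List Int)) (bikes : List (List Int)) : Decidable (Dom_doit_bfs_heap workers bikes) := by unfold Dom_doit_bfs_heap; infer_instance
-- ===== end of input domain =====

-- B replaces A's best-first (Dijkstra-style) heap search over (worker, taken-bikes) states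
-- by a top-down memoized bitmask DP (worker index = popcount of the mask); objective: faster.
-- Equivalence of RETURN values on Pre_ (inputs where the Python A returns normally).

-- ===== PORT A =====
-- workers[i][0], workers[i][1], bikes[j][0], bikes[j][1]: indices are in range on every
-- access the Python actually performs inside Pre_; the ports totalize with default values
-- (Python raises IndexError outside Pre_, which Pre_ excludes).
def pvDis (workers bikes : List (List Int)) (i j : Nat) : Int :=
  |((workers.getD i []).getD 0 0) - ((bikes.getD j []).getD 0 0)| +
  |((workers.getD i []).getD 1 0) - ((bikes.getD j []).getD 1 0)|

-- Python list comparison on [cost, i, taken] = lexicographic order; heapq pops the minimum.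
def pvLe (a e : Int × Nat × Nat) : Bool :=
  decide (a.1 < e.1) || (decide (a.1 = e.1) &&
    (decide (a.2.1 < e.2.1) || (decide (a.2.1 = e.2.1) && decide (a.2.2 ≤ e.2.2))))

-- heapq.heappush modelled by ordered insertion into the sorted pending list (observably
-- exact: heapq delivers entries in exactly this lexicographic order).
def pvPush (x : Int × Nat × Nat) : List (Int × Nat × Nat) → List (Int × Nat × Nat)
  | [] => [x]
  | y :: ys => if pvLe x y then x :: y :: ys else y :: pvPush x ys

-- the 'while True' loop of A; fuel is a totality guard only (large enough that it is never
-- exhausted on inputs in Pre_); fuel-out and empty-heap (Python: IndexError) return 0.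
def pvLoopA (workers bikes : List (List Int)) (W nb : Nat) :
    Nat → List (Int × Nat × Nat) → PySem.Set (Nat × Nat) → Int
  | 0, _, _ => 0
  | _ + 1, [], _ => 0
  | fuel + 1, (c, i, t) :: rest, seen =>
    if PySem.Set.contains seen (i, t) then pvLoopA workers bikes W nb fuel rest seen
    else if i = W then c
    else pvLoopA workers bikes W nb fuel
      ((List.range nb).foldl
        (fun hh j => if t &&& (1 <<< j) = 0 then
            pvPush (c + pvDis workers bikes i j, i + 1, t ||| (1 <<< j)) hh
          else hh) rest)
      (PySem.Set.add seen (i, t))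

def doit_bfs_heap (workers : List (List Int)) (bikes : List (List Int)) : Int :=
  pvLoopA workers bikes workers.length bikes.length
    ((bikes.length + 1) * ((workers.length + 1) * 2 ^ bikes.length) + 1)
    [(0, 0, 0)] PySem.Set.empty

-- ===== PORT B =====
-- B's inline  abs(workers[i][0]-bikes[j][0]) + abs(workers[i][1]-bikes[j][1])
def pvDisB (workers bikes : List (List Int)) (i j : Nat) : Int :=
  |((workers.getD i []).getD 0 0) - ((bikes.getD j []).getD 0 0)| +
  |((workers.getD i []).getD 1 0) - ((bikes.getD j []).getD 1 0)|

-- 'if res is None or c < res: res = c'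
def pvComb (res : Option Int) (c : Int) : Option Int :=
  match res with
  | none => some c
  | some rv => if c < rv then some c else some rv

mutual
-- best(i, taken); rem = W - i is the structural fuel of the recursion
def pvBest (workers bikes : List (List Int)) (W nb : Nat) :
    Nat → Nat → Nat → PySem.Dict Nat (Option Int) → Option Int × PySem.Dict Nat (Option Int)
  | i, 0, _t, m => (some 0, m)
  | i, r + 1, t, m =>
    match PySem.Dict.get? m t with
    | some v => (v, m)
    | none =>
      let p := pvBestFor workers bikes W nb i r t (List.range nb) none m
      (p.1, PySem.Dict.insert p.2 t p.1)
  termination_by i rem t m => (rem, 0)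

-- the 'for j in range(nb)' loop of best
def pvBestFor (workers bikes : List (List Int)) (W nb : Nat) (i r t : Nat) :
    List Nat → Option Int → PySem.Dict Nat (Option Int) → Option Int × PySem.Dict Nat (Option Int)
  | [], res, m => (res, m)
  | j :: js, res, m =>
    if t &&& (1 <<< j) = 0 then
      let p := pvBest workers bikes W nb (i + 1) r (t ||| (1 <<< j)) m
      let res' := match p.1 with
        | none => res
        | some v => pvComb res (v + pvDisB workers bikes i j)
      pvBestFor workers bikes W nb i r t js res' p.2
    else pvBestFor workers bikes W nb i r t js res m
  termination_by js res m => (r, js.length + 1)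
end

def doit_bfs_heap_alt (workers : List (List Int)) (bikes : List (List Int)) : Int :=
  (pvBest workers bikes workers.length bikes.length 0 workers.length 0 PySem.Dict.empty).1.getD 0

-- ===== PRECONDITION & SPEC =====
-- Pre_ excludes exactly the inputs on which the Python A raises IndexError: more workers
-- than bikes (the heap runs empty), or a worker/bike entry with fewer than 2 coordinates
-- that the search actually indexes (with workers = [] no coordinate is ever read).
def Pre_doit_bfs_heap (workers : List (List Int)) (bikes : List (List Int)) : Prop :=
  workers.length ≤ bikes.length ∧ (∀ w ∈ workers, 2 ≤ w.length) ∧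
    (workers ≠ [] → ∀ bk ∈ bikes, 2 ≤ bk.length)
instance (workers : List (List Int)) (bikes : List (List Int)) : Decidable (Pre_doit_bfs_heap workers bikes) := by unfold Pre_doit_bfs_heap; infer_instance

def pvWitness_doit_bfs_heap : List (List Int) × List (List Int) := ([[0, 0]], [[1, 0]])

def Spec_doit_bfs_heap (workers : List (List Int)) (bikes : List (List Int)) (out : Int) : Prop := out = doit_bfs_heap_alt workers bikes
instance (workers : List (List Int)) (bikes : List (List Int)) (out : Int) : Decidable (Spec_doit_bfs_heap workers bikes out) := by unfold Spec_doit_bfs_heap; infer_instance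

-- ===== CLAIM (what is proved, stated in full; the proofs are below) =====
def Claim_equal_doit_bfs_heap : Prop := ∀ (workers : List (List Int)) (bikes : List (List Int)), Dom_doit_bfs_heap workers bikes → Pre_doit_bfs_heap workers bikes → Spec_doit_bfs_heap workers bikes (doit_bfs_heap workers bikes)

-- ===== LEMMAS AND PROOFS =====

-- ---- the optimal-completion function g (proof-side value both ports are related to) ----
mutual
def pvG (workers bikes : List (List Int)) (nb : Nat) : Nat → Nat → Nat → Option Int
  | _i, 0, _t => some 0
  | i, r + 1, t => pvGFor workers bikes nb i r t (List.range nb) none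
  termination_by i rem t => (rem, 0)

def pvGFor (workers bikes : List (List Int)) (nb : Nat) (i r t : Nat) :
    List Nat → Option Int → Option Int
  | [], res => res
  | j :: js, res =>
    if t &&& (1 <<< j) = 0 then
      let res' := match pvG workers bikes nb (i + 1) r (t ||| (1 <<< j)) with
        | none => res
        | some v => pvComb res (v + pvDis workers bikes i j)
      pvGFor workers bikes nb i r t js res'
    else pvGFor workers bikes nb i r t js res
  termination_by js res => (r, js.length + 1)
end

-- free-bike count of a mask
def pvFc (nb t : Nat) : Nat := (List.range nb).countP (fun j => t &&& (1 <<< j) == 0)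

theorem pvDisB_eq (w b : List (List Int)) (i j : Nat) : pvDisB w b i j = pvDis w b i j := rfl

theorem pvDis_nonneg (w b : List (List Int)) (i j : Nat) : 0 ≤ pvDis w b i j := by
  unfold pvDis; positivity

theorem pv_and_shift_eq_zero (t j : Nat) : t &&& (1 <<< j) = 0 ↔ t.testBit j = false := by
  rw [Nat.shiftLeft_eq, one_mul]
  rw [Nat.and_two_pow]
  cases h : t.testBit j <;> simp [h]

theorem pv_free_or (t j x : Nat) :
    ((t ||| (1 <<< j)) &&& (1 <<< x) = 0) ↔ (t &&& (1 <<< x) = 0 ∧ x ≠ j) := by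
  rw [pv_and_shift_eq_zero, pv_and_shift_eq_zero]
  rw [Nat.testBit_or, Nat.shiftLeft_eq, one_mul, Nat.testBit_two_pow]
  constructor
  · intro h
    simp only [Bool.or_eq_false_iff, decide_eq_false_iff_not] at h
    exact ⟨h.1, fun hx => h.2 hx.symm⟩
  · rintro ⟨h1, h2⟩
    simp only [Bool.or_eq_false_iff, decide_eq_false_iff_not]
    exact ⟨h1, fun hx => h2 hx.symm⟩

theorem pv_or_lt (nb t j : Nat) (ht : t < 2 ^ nb) (hj : j < nb) : t ||| (1 <<< j) < 2 ^ nb := by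
  have h2 : 1 <<< j < 2 ^ nb := by
    rw [Nat.shiftLeft_eq, one_mul]
    exact Nat.pow_lt_pow_right (by norm_num) hj
  exact Nat.or_lt_two_pow ht h2

theorem pv_countP_sub_one (p : Nat → Bool) (l : List Nat) (hnd : l.Nodup) (j : Nat)
    (hj : j ∈ l) (hp : p j = true) :
    l.countP (fun x => p x && !(x == j)) + 1 = l.countP p := by
  induction l with
  | nil => simp at hj
  | cons a l ih =>
    rcases List.nodup_cons.mp hnd with ⟨hna, hndl⟩
    by_cases haj : a = j
    · subst haj
      have hcong : l.countP (fun x => p x && !(x == a)) = l.countP p := by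
        apply List.countP_congr
        intro x hx
        have hxa : (x == a) = false := by
          simp only [beq_eq_false_iff_ne]
          exact fun hxa => hna (hxa ▸ hx)
        simp [hxa]
      rw [List.countP_cons, List.countP_cons, hcong]
      simp [hp]
    · have hjl : j ∈ l := by
        rcases List.mem_cons.mp hj with h | h
        · exact absurd h.symm haj
        · exact h
      have hrec := ih hndl hjl
      rw [List.countP_cons, List.countP_cons]
      have haj' : (a == j) = false := by simp [haj]
      by_cases hpa : p a = true
      · simp only [hpa, haj', Bool.not_false, Bool.and_true]
        omega
      · simp only [Bool.not_eq_true] at hpa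
        simp only [hpa, Bool.false_and]
        omega

theorem pvFc_or (nb t j : Nat) (hj : j < nb) (hfree : t &&& (1 <<< j) = 0) :
    pvFc nb (t ||| (1 <<< j)) + 1 = pvFc nb t := by
  unfold pvFc
  have hcong : (List.range nb).countP (fun x => (t ||| (1 <<< j)) &&& (1 <<< x) == 0) =
      (List.range nb).countP (fun x => (t &&& (1 <<< x) == 0) && !(x == j)) := by
    apply List.countP_congr
    intro x _
    by_cases h1 : t &&& (1 <<< x) = 0
    · by_cases h2 : x = j
      · have : ¬ (t ||| (1 <<< j)) &&& (1 <<< x) = 0 := by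
          intro hc
          exact ((pv_free_or t j x).mp hc).2 h2
        subst h2
        simp [this]
      · have : (t ||| (1 <<< j)) &&& (1 <<< x) = 0 := (pv_free_or t j x).mpr ⟨h1, h2⟩
        simp [this, h1, h2]
    · have : ¬ (t ||| (1 <<< j)) &&& (1 <<< x) = 0 := by
        intro hc
        exact h1 ((pv_free_or t j x).mp hc).1
      simp [this, h1]
  rw [hcong]
  exact pv_countP_sub_one _ (List.range nb) (List.nodup_range) j (List.mem_range.mpr hj)
    (by simp [hfree])

theorem pvFc_zero (nb : Nat) : pvFc nb 0 = nb := by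
  unfold pvFc
  rw [List.countP_eq_length.mpr]
  · exact List.length_range
  · intro x _; simp [Nat.zero_and]

theorem pvFc_pos (nb t : Nat) (h : 0 < pvFc nb t) : ∃ j, j < nb ∧ t &&& (1 <<< j) = 0 := by
  unfold pvFc at h
  rw [List.countP_pos_iff] at h
  rcases h with ⟨j, hj, hpj⟩
  exact ⟨j, List.mem_range.mp hj, by simpa using hpj⟩

theorem pvComb_spec (res : Option Int) (c : Int) :
    ∃ out, pvComb res c = some out ∧ out ≤ c ∧ (∀ rv, res = some rv → out ≤ rv) ∧
      (out = c ∨ res = some out) := by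
  cases res with
  | none => exact ⟨c, rfl, le_refl c, by simp, Or.inl rfl⟩
  | some rv =>
    by_cases h : c < rv
    · exact ⟨c, by simp [pvComb, h], le_refl c, by intro rv' h'; simp at h'; omega, Or.inl rfl⟩
    · refine ⟨rv, by simp [pvComb, h], by omega, ?_, Or.inr rfl⟩
      intro rv' h'; simp at h'; omega

-- ---- pvGFor as a running minimum ----
theorem pvGFor_isSome (w b : List (List Int)) (nb i r t : Nat) (js : List Nat)
    (res : Option Int) (h : res.isSome) : (pvGFor w b nb i r t js res).isSome := by
  induction js generalizing res with
  | nil => simpa [pvGFor] using h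
  | cons j js ih =>
    rw [pvGFor]
    split
    · cases hg : pvG w b nb (i + 1) r (t ||| (1 <<< j)) with
      | none => simp only [hg]; exact ih res h
      | some v =>
        simp only [hg]
        obtain ⟨out, hout, -⟩ := pvComb_spec res (v + pvDis w b i j)
        exact ih _ (by simp [hout])
    · exact ih res h

theorem pvGFor_isSome_cand (w b : List (List Int)) (nb i r t : Nat) (js : List Nat)
    (res : Option Int) (j : Nat) (hj : j ∈ js) (hfree : t &&& (1 <<< j) = 0)
    (hsub : (pvG w b nb (i + 1) r (t ||| (1 <<< j))).isSome) :
    (pvGFor w b nb i r t js res).isSome := by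
  induction js generalizing res with
  | nil => simp at hj
  | cons j' js ih =>
    rcases List.mem_cons.mp hj with rfl | hjs
    · rw [pvGFor]
      rw [if_pos hfree]
      obtain ⟨v, hv⟩ := Option.isSome_iff_exists.mp hsub
      simp only [hv]
      obtain ⟨out, hout, -⟩ := pvComb_spec res (v + pvDis w b i j)
      exact pvGFor_isSome w b nb i r t js _ (by simp [hout])
    · rw [pvGFor]
      split
      · cases hg : pvG w b nb (i + 1) r (t ||| (1 <<< j')) with
        | none => simp only [hg]; exact ih res hjs
        | some v => simp only [hg]; exact ih _ hjs
      · exact ih res hjs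

theorem pvGFor_le_res (w b : List (List Int)) (nb i r t : Nat) (js : List Nat)
    (res : Option Int) (out rv : Int) (hout : pvGFor w b nb i r t js res = some out)
    (hres : res = some rv) : out ≤ rv := by
  induction js generalizing res rv with
  | nil =>
    rw [pvGFor] at hout
    rw [hres] at hout
    simp at hout
    omega
  | cons j js ih =>
    rw [pvGFor] at hout
    split at hout
    · cases hg : pvG w b nb (i + 1) r (t ||| (1 <<< j)) with
      | none => simp only [hg] at hout; exact ih res rv hout hres
      | some v =>
        simp only [hg] at hout
        obtain ⟨out', hout', -, hle, -⟩ := pvComb_spec res (v + pvDis w b i j)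
        have h1 : out ≤ out' := ih _ out' (by simpa [hout'] using hout) rfl
        have h2 : out' ≤ rv := hle rv hres
        omega
    · exact ih res rv hout hres

theorem pvGFor_le_cand (w b : List (List Int)) (nb i r t : Nat) (js : List Nat)
    (res : Option Int) (out : Int) (hout : pvGFor w b nb i r t js res = some out)
    (j : Nat) (hj : j ∈ js) (hfree : t &&& (1 <<< j) = 0) (v : Int)
    (hsub : pvG w b nb (i + 1) r (t ||| (1 <<< j)) = some v) :
    out ≤ v + pvDis w b i j := by
  induction js generalizing res with
  | nil => simp at hj
  | cons j' js ih =>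
    rcases List.mem_cons.mp hj with rfl | hjs
    · rw [pvGFor] at hout
      rw [if_pos hfree] at hout
      simp only [hsub] at hout
      obtain ⟨out', hout', hlec, -, -⟩ := pvComb_spec res (v + pvDis w b i j)
      have h1 : out ≤ out' := pvGFor_le_res w b nb i r t js _ out out'
        (by simpa [hout'] using hout) rfl
      omega
    · rw [pvGFor] at hout
      split at hout
      · cases hg : pvG w b nb (i + 1) r (t ||| (1 <<< j')) with
        | none => simp only [hg] at hout; exact ih res hout hjs
        | some v' => simp only [hg] at hout; exact ih _ hout hjs
      · exact ih res hout hjs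

theorem pvGFor_cases (w b : List (List Int)) (nb i r t : Nat) (js : List Nat)
    (res : Option Int) (out : Int) (hout : pvGFor w b nb i r t js res = some out) :
    res = some out ∨ ∃ j ∈ js, t &&& (1 <<< j) = 0 ∧
      ∃ v, pvG w b nb (i + 1) r (t ||| (1 <<< j)) = some v ∧ out = v + pvDis w b i j := by
  induction js generalizing res with
  | nil =>
    rw [pvGFor] at hout
    exact Or.inl hout
  | cons j js ih =>
    rw [pvGFor] at hout
    split at hout
    · rename_i hfree
      cases hg : pvG w b nb (i + 1) r (t ||| (1 <<< j)) with
      | none =>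
        simp only [hg] at hout
        rcases ih res hout with h | ⟨j', hj', hf', v, hv, he⟩
        · exact Or.inl h
        · exact Or.inr ⟨j', List.mem_cons_of_mem _ hj', hf', v, hv, he⟩
      | some v =>
        simp only [hg] at hout
        obtain ⟨out', hout', -, -, hcase⟩ := pvComb_spec res (v + pvDis w b i j)
        rcases ih (some out') (by simpa [hout'] using hout) with h | ⟨j', hj', hf', v', hv', he⟩
        · have hoo : out' = out := Option.some_inj.mp h
          rcases hcase with hc | hr
          · exact Or.inr ⟨j, List.mem_cons_self, hfree, v, hg, by rw [← hoo, hc]⟩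
          · exact Or.inl (by rw [hoo] at hr; exact hr)
        · exact Or.inr ⟨j', List.mem_cons_of_mem _ hj', hf', v', hv', he⟩
    · rcases ih res hout with h | ⟨j', hj', hf', v, hv, he⟩
      · exact Or.inl h
      · exact Or.inr ⟨j', List.mem_cons_of_mem _ hj', hf', v, hv, he⟩

-- ---- pvG facts ----
theorem pvG_zero (w b : List (List Int)) (nb i t : Nat) : pvG w b nb i 0 t = some 0 := by
  rw [pvG]

theorem pvG_succ (w b : List (List Int)) (nb i r t : Nat) :
    pvG w b nb i (r + 1) t = pvGFor w b nb i r t (List.range nb) none := by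
  rw [pvG]

theorem pvG_nonneg (w b : List (List Int)) (nb : Nat) :
    ∀ r i t v, pvG w b nb i r t = some v → 0 ≤ v := by
  intro r
  induction r with
  | zero =>
    intro i t v hv
    rw [pvG_zero] at hv
    simp at hv
    omega
  | succ r ih =>
    intro i t v hv
    rw [pvG_succ] at hv
    rcases pvGFor_cases w b nb i r t (List.range nb) none v hv with h | ⟨j, _, _, v', hv', he⟩
    · simp at h
    · have := ih (i + 1) (t ||| (1 <<< j)) v' hv'
      have := pvDis_nonneg w b i j
      omega

theorem pvG_isSome (w b : List (List Int)) (nb : Nat) :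
    ∀ r i t, r ≤ pvFc nb t → (pvG w b nb i r t).isSome := by
  intro r
  induction r with
  | zero => intro i t _; rw [pvG_zero]; rfl
  | succ r ih =>
    intro i t hr
    obtain ⟨j, hj, hfree⟩ := pvFc_pos nb t (by omega)
    have hfc := pvFc_or nb t j hj hfree
    have hsub := ih (i + 1) (t ||| (1 <<< j)) (by omega)
    rw [pvG_succ]
    exact pvGFor_isSome_cand w b nb i r t (List.range nb) none j (List.mem_range.mpr hj)
      hfree hsub

theorem pvG_le (w b : List (List Int)) (nb i r t : Nat) (u : Int)
    (hu : pvG w b nb i (r + 1) t = some u) (j : Nat) (hj : j < nb)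
    (hfree : t &&& (1 <<< j) = 0) (v : Int)
    (hv : pvG w b nb (i + 1) r (t ||| (1 <<< j)) = some v) : u ≤ v + pvDis w b i j := by
  rw [pvG_succ] at hu
  exact pvGFor_le_cand w b nb i r t (List.range nb) none u hu j (List.mem_range.mpr hj)
    hfree v hv

theorem pvG_exists (w b : List (List Int)) (nb i r t : Nat) (u : Int)
    (hu : pvG w b nb i (r + 1) t = some u) :
    ∃ j, j < nb ∧ t &&& (1 <<< j) = 0 ∧
      ∃ v, pvG w b nb (i + 1) r (t ||| (1 <<< j)) = some v ∧ u = v + pvDis w b i j := by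
  rw [pvG_succ] at hu
  rcases pvGFor_cases w b nb i r t (List.range nb) none u hu with h | ⟨j, hj, hf, v, hv, he⟩
  · simp at h
  · exact ⟨j, List.mem_range.mp hj, hf, v, hv, he⟩

-- ---- B-side: the memoized recursion computes pvG ----
def pvGood (w b : List (List Int)) (W nb : Nat) (m : PySem.Dict Nat (Option Int)) : Prop :=
  ∀ t ov, m.get? t = some ov → ov = pvG w b nb (nb - pvFc nb t) (W - (nb - pvFc nb t)) t

theorem pvBest_correct (w b : List (List Int)) (W nb : Nat) :
    ∀ r i t m, i + r = W → i + pvFc nb t = nb → pvGood w b W nb m →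
      (pvBest w b W nb i r t m).1 = pvG w b nb i r t ∧
        pvGood w b W nb (pvBest w b W nb i r t m).2 := by
  intro r
  induction r with
  | zero =>
    intro i t m hiW hfc hg
    constructor
    · rw [pvBest, pvG]
    · rw [pvBest]
      exact hg
  | succ r ih =>
    intro i t m hiW hfc hg
    have hFor : ∀ js : List Nat, (∀ j ∈ js, j < nb) → ∀ res m', pvGood w b W nb m' →
        (pvBestFor w b W nb i r t js res m').1 = pvGFor w b nb i r t js res ∧
          pvGood w b W nb (pvBestFor w b W nb i r t js res m').2 := by
      intro js
      induction js with
      | nil => intro _ res m' hg'; rw [pvBestFor, pvGFor]; exact ⟨rfl, hg'⟩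
      | cons j js ihj =>
        intro hlt res m' hg'
        have hjnb : j < nb := hlt j List.mem_cons_self
        by_cases hfree : t &&& (1 <<< j) = 0
        · have hfc' : (i + 1) + pvFc nb (t ||| (1 <<< j)) = nb := by
            have := pvFc_or nb t j hjnb hfree
            omega
          have hsub := ih (i + 1) (t ||| (1 <<< j)) m' (by omega) hfc' hg'
          rw [pvBestFor, pvGFor, if_pos hfree, if_pos hfree]
          dsimp only
          simp only [pvDisB_eq]
          rw [hsub.1]
          exact ihj (fun x hx => hlt x (List.mem_cons_of_mem _ hx)) _ _ hsub.2
        · rw [pvBestFor, pvGFor, if_neg hfree, if_neg hfree]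
          exact ihj (fun x hx => hlt x (List.mem_cons_of_mem _ hx)) res m' hg'
    rw [pvBest]
    cases hm : PySem.Dict.get? m t with
    | some ov =>
      dsimp only
      have hov := hg t ov hm
      have hi : nb - pvFc nb t = i := by omega
      have hr2 : W - i = r + 1 := by omega
      rw [hi, hr2] at hov
      exact ⟨hov, hg⟩
    | none =>
      dsimp only
      have hF := hFor (List.range nb) (fun x hx => List.mem_range.mp hx) none m hg
      constructor
      · rw [hF.1, pvG_succ]
      · intro t' ov hv'
        rw [PySem.Dict.get?_insert] at hv'
        by_cases ht' : t' = t
        · subst ht'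
          rw [if_pos rfl] at hv'
          have hov : ov = (pvBestFor w b W nb i r t' (List.range nb) none m).1 :=
            (Option.some_inj.mp hv').symm
          rw [hov, hF.1, ← pvG_succ]
          have hi : nb - pvFc nb t' = i := by omega
          have hr2 : W - i = r + 1 := by omega
          rw [hi, hr2]
        · rw [if_neg ht'] at hv'
          exact hF.2 t' ov hv'

theorem pvAlt_eq (w b : List (List Int)) :
    doit_bfs_heap_alt w b = (pvG w b b.length 0 w.length 0).getD 0 := by
  unfold doit_bfs_heap_alt
  have h := pvBest_correct w b w.length b.length w.length 0 0 PySem.Dict.empty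
    (by omega) (by rw [pvFc_zero]; omega) (by intro t ov h; simp [PySem.Dict.empty, PySem.Dict.get?] at h)
  rw [h.1]

-- ---- A-side: heap order and insertion ----
theorem pvLe_cost (a e : Int × Nat × Nat) (h : pvLe a e = true) : a.1 ≤ e.1 := by
  unfold pvLe at h
  simp only [Bool.or_eq_true, Bool.and_eq_true, decide_eq_true_eq] at h
  omega

theorem pvLe_total (a e : Int × Nat × Nat) (h : pvLe a e = false) : pvLe e a = true := by
  unfold pvLe at h ⊢
  simp only [Bool.or_eq_false_iff, Bool.and_eq_false_iff, Bool.or_eq_true, Bool.and_eq_true,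
    decide_eq_true_eq, decide_eq_false_iff_not] at h ⊢
  omega

theorem pvLe_trans (a e f : Int × Nat × Nat) (h1 : pvLe a e = true) (h2 : pvLe e f = true) :
    pvLe a f = true := by
  unfold pvLe at h1 h2 ⊢
  simp only [Bool.or_eq_true, Bool.and_eq_true, decide_eq_true_eq] at h1 h2 ⊢
  omega

theorem pvPush_mem (x y : Int × Nat × Nat) (l : List (Int × Nat × Nat)) :
    x ∈ pvPush y l ↔ x = y ∨ x ∈ l := by
  induction l with
  | nil => simp [pvPush]
  | cons z l ih =>
    rw [pvPush]
    split
    · simp [List.mem_cons]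
      try tauto
    · simp [List.mem_cons, ih]
      try tauto

theorem pvPush_length (y : Int × Nat × Nat) (l : List (Int × Nat × Nat)) :
    (pvPush y l).length = l.length + 1 := by
  induction l with
  | nil => rfl
  | cons z l ih =>
    rw [pvPush]
    split
    · simp
    · simp [ih]

theorem pvPush_pairwise (y : Int × Nat × Nat) (l : List (Int × Nat × Nat))
    (h : l.Pairwise (fun a e => pvLe a e = true)) :
    (pvPush y l).Pairwise (fun a e => pvLe a e = true) := by
  induction l with
  | nil => simp [pvPush]
  | cons z l ih =>
    rw [pvPush]
    rcases List.pairwise_cons.mp h with ⟨hz, hl⟩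
    split
    · rename_i hle
      refine List.pairwise_cons.mpr ⟨?_, h⟩
      intro e he
      rcases List.mem_cons.mp he with rfl | hel
      · exact hle
      · exact pvLe_trans y z e hle (hz e hel)
    · rename_i hnle
      refine List.pairwise_cons.mpr ⟨?_, ih hl⟩
      intro e he
      rcases (pvPush_mem e y l).mp he with rfl | hel
      · exact pvLe_total _ z (by simpa using hnle)
      · exact hz e hel

theorem pvFoldPush_mem (cond : Nat → Prop) [DecidablePred cond] (f : Nat → Int × Nat × Nat)
    (js : List Nat) (acc : List (Int × Nat × Nat)) (x : Int × Nat × Nat) :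
    x ∈ js.foldl (fun hh j => if cond j then pvPush (f j) hh else hh) acc ↔
      x ∈ acc ∨ ∃ j ∈ js, cond j ∧ x = f j := by
  induction js generalizing acc with
  | nil => simp
  | cons j js ih =>
    rw [List.foldl_cons]
    by_cases hc : cond j
    · rw [if_pos hc, ih]
      simp only [pvPush_mem, List.mem_cons]
      constructor
      · rintro (( rfl | hx) | ⟨j', hj', hcj', rfl⟩)
        · exact Or.inr ⟨j, Or.inl rfl, hc, rfl⟩
        · exact Or.inl hx
        · exact Or.inr ⟨j', Or.inr hj', hcj', rfl⟩
      · rintro (hx | ⟨j', (rfl | hj'), hcj', rfl⟩)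
        · exact Or.inl (Or.inr hx)
        · exact Or.inl (Or.inl rfl)
        · exact Or.inr ⟨j', hj', hcj', rfl⟩
    · rw [if_neg hc, ih]
      constructor
      · rintro (hx | ⟨j', hj', hcj', rfl⟩)
        · exact Or.inl hx
        · exact Or.inr ⟨j', List.mem_cons_of_mem _ hj', hcj', rfl⟩
      · rintro (hx | ⟨j', hj', hcj', rfl⟩)
        · exact Or.inl hx
        · rcases List.mem_cons.mp hj' with rfl | hj''
          · exact absurd hcj' hc
          · exact Or.inr ⟨j', hj'', hcj', rfl⟩

theorem pvFoldPush_length (cond : Nat → Prop) [DecidablePred cond] (f : Nat → Int × Nat × Nat)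
    (js : List Nat) (acc : List (Int × Nat × Nat)) :
    (js.foldl (fun hh j => if cond j then pvPush (f j) hh else hh) acc).length ≤
      acc.length + js.length := by
  induction js generalizing acc with
  | nil => simp
  | cons j js ih =>
    rw [List.foldl_cons]
    by_cases hc : cond j
    · rw [if_pos hc]
      have := ih (pvPush (f j) acc)
      rw [pvPush_length] at this
      simp only [List.length_cons]
      omega
    · rw [if_neg hc]
      have := ih acc
      simp only [List.length_cons]
      omega

theorem pvFoldPush_pairwise (cond : Nat → Prop) [DecidablePred cond] (f : Nat → Int × Nat × Nat)
    (js : List Nat) (acc : List (Int × Nat × Nat))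
    (h : acc.Pairwise (fun a e => pvLe a e = true)) :
    (js.foldl (fun hh j => if cond j then pvPush (f j) hh else hh) acc).Pairwise
      (fun a e => pvLe a e = true) := by
  induction js generalizing acc with
  | nil => simpa
  | cons j js ih =>
    rw [List.foldl_cons]
    by_cases hc : cond j
    · rw [if_pos hc]
      exact ih _ (pvPush_pairwise _ _ h)
    · rw [if_neg hc]
      exact ih _ h

-- ---- A-side invariants ----
def pvJH (w b : List (List Int)) (W nb : Nat) (ans : Int) (h : List (Int × Nat × Nat)) : Prop :=
  ∀ e ∈ h, e.2.1 ≤ W ∧ e.2.2 < 2 ^ nb ∧ W ≤ e.2.1 + pvFc nb e.2.2 ∧ 0 ≤ e.1 ∧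
    ∀ v, pvG w b nb e.2.1 (W - e.2.1) e.2.2 = some v → ans ≤ e.1 + v

def pvJW (w b : List (List Int)) (W nb : Nat) (ans : Int) (h : List (Int × Nat × Nat))
    (seen : List (Nat × Nat)) : Prop :=
  ∃ e ∈ h, (e.2.1, e.2.2) ∉ seen ∧
    ∃ v, pvG w b nb e.2.1 (W - e.2.1) e.2.2 = some v ∧ e.1 + v ≤ ans

def pvJS (w b : List (List Int)) (W nb : Nat) (k : Nat × Nat → Int)
    (seen : List (Nat × Nat)) (h : List (Int × Nat × Nat)) : Prop :=
  ∀ s ∈ seen, s.1 < W ∧ s.2 < 2 ^ nb ∧ ∀ j, j < nb → s.2 &&& (1 <<< j) = 0 →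
    (((s.1 + 1, s.2 ||| (1 <<< j)) ∈ seen ∧
        k (s.1 + 1, s.2 ||| (1 <<< j)) ≤ k s + pvDis w b s.1 j) ∨
     ((s.1 + 1, s.2 ||| (1 <<< j)) ∉ seen ∧
        (k s + pvDis w b s.1 j, s.1 + 1, s.2 ||| (1 <<< j)) ∈ h))

def pvJK (k : Nat × Nat → Int) (seen : List (Nat × Nat)) (h : List (Int × Nat × Nat)) : Prop :=
  ∀ s ∈ seen, ∀ e ∈ h, k s ≤ e.1

theorem pv_card (W P : Nat) (l : List (Nat × Nat)) (hnd : l.Nodup)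
    (hb : ∀ s ∈ l, s.1 ≤ W ∧ s.2 < P) : l.length ≤ (W + 1) * P := by
  have hsub : l.toFinset ⊆ Finset.range (W + 1) ×ˢ Finset.range P := by
    intro s hs
    rw [List.mem_toFinset] at hs
    have := hb s hs
    rw [Finset.mem_product, Finset.mem_range, Finset.mem_range]
    omega
  calc l.length = l.toFinset.card := (List.toFinset_card_of_nodup hnd).symm
    _ ≤ (Finset.range (W + 1) ×ˢ Finset.range P).card := Finset.card_le_card hsub
    _ = (W + 1) * P := by simp [Finset.card_product]

theorem pvChain (w b : List (List Int)) (W nb : Nat) (ans : Int) (k : Nat × Nat → Int)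
    (seen : List (Nat × Nat)) (h : List (Int × Nat × Nat))
    (hJS : pvJS w b W nb k seen h) (hJK : pvJK k seen h) :
    ∀ n i t, (i, t) ∈ seen → W - i ≤ n → ∀ v, pvG w b nb i (W - i) t = some v →
      k (i, t) + v ≤ ans → pvJW w b W nb ans h seen := by
  intro n
  induction n with
  | zero =>
    intro i t hmem hn v hv hle
    have := (hJS (i, t) hmem).1
    omega
  | succ n ih =>
    intro i t hmem hn v hv hle
    obtain ⟨hiW, -, hclause⟩ := hJS (i, t) hmem
    dsimp only at hclause
    have hWi : W - i = (W - (i + 1)) + 1 := by omega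
    rw [hWi] at hv
    obtain ⟨j, hj, hfree, v', hv', hvv⟩ := pvG_exists w b nb i (W - (i + 1)) t v hv
    rcases hclause j hj hfree with ⟨hmem', hk'⟩ | ⟨hnm, hent⟩
    · have hd := pvDis_nonneg w b i j
      exact ih (i + 1) (t ||| (1 <<< j)) hmem' (by omega) v' hv' (by omega)
    · exact ⟨(k (i, t) + pvDis w b i j, i + 1, t ||| (1 <<< j)), hent, hnm,
        v', hv', by omega⟩

theorem pv_contains_iff (s : List (Nat × Nat)) (x : Nat × Nat) :
    PySem.Set.contains s x = true ↔ x ∈ s := by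
  simp [PySem.Set.contains]

def pvKup (k : Nat × Nat → Int) (s0 : Nat × Nat) (c : Int) : Nat × Nat → Int :=
  fun s => if s = s0 then c else k s

theorem pvKup_self (k : Nat × Nat → Int) (s0 : Nat × Nat) (c : Int) : pvKup k s0 c s0 = c := by
  simp [pvKup]

theorem pvKup_ne (k : Nat × Nat → Int) (s0 s : Nat × Nat) (c : Int) (h : s ≠ s0) :
    pvKup k s0 c s = k s := by
  simp [pvKup, h]

theorem pvLoopA_correct (w b : List (List Int)) (W nb : Nat) (ans : Int) :
    ∀ fuel (h : List (Int × Nat × Nat)) (seen : List (Nat × Nat)) (k : Nat × Nat → Int),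
      h.Pairwise (fun a e => pvLe a e = true) →
      pvJH w b W nb ans h → pvJW w b W nb ans h seen → pvJS w b W nb k seen h →
      pvJK k seen h → seen.Nodup →
      h.length + (nb + 1) * ((W + 1) * 2 ^ nb - seen.length) ≤ fuel →
      pvLoopA w b W nb fuel h seen = ans := by
  intro fuel
  induction fuel with
  | zero =>
    intro h seen k _hsort _hJH hJW _hJS _hJK _hnd hfuel
    obtain ⟨e, he, -⟩ := hJW
    cases h with
    | nil => simp at he
    | cons hd rest => simp [List.length_cons] at hfuel
  | succ fuel ih =>
    intro h seen k hsort hJH hJW hJS hJK hnd hfuel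
    cases h with
    | nil => obtain ⟨e, he, -⟩ := hJW; simp at he
    | cons hd rest =>
      obtain ⟨c, i, t⟩ := hd
      rw [pvLoopA]
      by_cases hseen : (i, t) ∈ seen
      · rw [if_pos ((pv_contains_iff seen (i, t)).mpr hseen)]
        refine ih rest seen k (List.pairwise_cons.mp hsort).2
          (fun e he => hJH e (List.mem_cons_of_mem _ he)) ?_ ?_
          (fun s hs e he => hJK s hs e (List.mem_cons_of_mem _ he)) hnd ?_
        · obtain ⟨e, he, hns, v, hv, hle⟩ := hJW
          refine ⟨e, ?_, hns, v, hv, hle⟩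
          rcases List.mem_cons.mp he with rfl | hr
          · exact absurd hseen hns
          · exact hr
        · intro s hs
          obtain ⟨h1, h2, hclause⟩ := hJS s hs
          refine ⟨h1, h2, ?_⟩
          intro j hj hfree
          rcases hclause j hj hfree with hl | ⟨hnm, hent⟩
          · exact Or.inl hl
          · refine Or.inr ⟨hnm, ?_⟩
            rcases List.mem_cons.mp hent with heq | hr
            · exfalso
              apply hnm
              have : ((s.1 + 1, s.2 ||| (1 <<< j)) : Nat × Nat) = (i, t) := by
                have := congrArg (fun x : Int × Nat × Nat => (x.2.1, x.2.2)) heq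
                simpa using this
              rw [this]
              exact hseen
            · exact hr
        · simp only [List.length_cons] at hfuel
          omega
      · rw [if_neg (by rw [pv_contains_iff]; exact hseen)]
        by_cases hiW : i = W
        · rw [if_pos hiW]
          have hhd := hJH (c, i, t) List.mem_cons_self
          dsimp only at hhd
          obtain ⟨-, -, -, -, hansle⟩ := hhd
          have hg0 : pvG w b nb i (W - i) t = some 0 := by
            rw [hiW, Nat.sub_self, pvG_zero]
          have h1 : ans ≤ c + 0 := hansle 0 hg0
          obtain ⟨e, he, -, v, hv, hle⟩ := hJW
          have hcle : c ≤ e.1 := by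
            rcases List.mem_cons.mp he with rfl | hr
            · exact le_refl _
            · exact pvLe_cost _ _ ((List.pairwise_cons.mp hsort).1 e hr)
          have hv0 : 0 ≤ v := pvG_nonneg w b nb _ _ _ v hv
          omega
        · rw [if_neg hiW]
          have hhd := hJH (c, i, t) List.mem_cons_self
          dsimp only at hhd
          obtain ⟨hiw, htlt, hfcb, hc0, hansle⟩ := hhd
          have hiltW : i < W := lt_of_le_of_ne hiw hiW
          have hWi : W - i = (W - (i + 1)) + 1 := by omega
          have hsome : (pvG w b nb i (W - i) t).isSome :=
            pvG_isSome w b nb (W - i) i t (by omega)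
          obtain ⟨v, hv⟩ := Option.isSome_iff_exists.mp hsome
          have hansv : ans ≤ c + v := hansle v hv
          have hvS : pvG w b nb i ((W - (i + 1)) + 1) t = some v := by rw [← hWi]; exact hv
          have hcf : PySem.Set.contains seen (i, t) = false := by
            cases hcb : PySem.Set.contains seen (i, t)
            · rfl
            · exact absurd ((pv_contains_iff _ _).mp hcb) hseen
          have hseenadd : PySem.Set.add seen (i, t) = seen ++ [(i, t)] := by
            rw [show PySem.Set.add seen (i, t) =
              (if PySem.Set.contains seen (i, t) then seen else seen ++ [(i, t)]) from rfl, hcf]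
            simp
          rw [hseenadd]
          have hrestsort := (List.pairwise_cons.mp hsort).2
          have hheadle := (List.pairwise_cons.mp hsort).1
          have hmemH' : ∀ x, x ∈ (List.range nb).foldl
              (fun hh j => if t &&& (1 <<< j) = 0 then
                pvPush (c + pvDis w b i j, i + 1, t ||| (1 <<< j)) hh else hh) rest ↔
              x ∈ rest ∨ ∃ j ∈ List.range nb, t &&& (1 <<< j) = 0 ∧
                x = (c + pvDis w b i j, i + 1, t ||| (1 <<< j)) := by
            intro x
            exact pvFoldPush_mem (fun j => t &&& (1 <<< j) = 0)
              (fun j => (c + pvDis w b i j, i + 1, t ||| (1 <<< j))) (List.range nb) rest x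
          have hnewg : ∀ j, j < nb → t &&& (1 <<< j) = 0 →
              ∀ v', pvG w b nb (i + 1) (W - (i + 1)) (t ||| (1 <<< j)) = some v' →
                ans ≤ (c + pvDis w b i j) + v' := by
            intro j hj hfree v' hv'
            have := pvG_le w b nb i (W - (i + 1)) t v hvS j hj hfree v' hv'
            omega
          have hmemS' : ∀ x : Nat × Nat, x ∈ seen ++ [(i, t)] ↔ x ∈ seen ∨ x = (i, t) := by
            intro x; simp
          have hnd' : (seen ++ [(i, t)]).Nodup := by
            rw [List.nodup_append]
            refine ⟨hnd, List.nodup_singleton _, ?_⟩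
            intro x hx1 y hy hxy
            have hy2 : y = (i, t) := by simpa using hy
            exact hseen ((hxy.trans hy2) ▸ hx1)
          have hJH' : pvJH w b W nb ans ((List.range nb).foldl
              (fun hh j => if t &&& (1 <<< j) = 0 then
                pvPush (c + pvDis w b i j, i + 1, t ||| (1 <<< j)) hh else hh) rest) := by
            intro e he
            rcases (hmemH' e).mp he with hr | ⟨j, hjr, hfree, rfl⟩
            · exact hJH e (List.mem_cons_of_mem _ hr)
            · have hj := List.mem_range.mp hjr
              have hfc := pvFc_or nb t j hj hfree
              have hd0 := pvDis_nonneg w b i j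
              refine ⟨by dsimp only; omega, by dsimp only; exact pv_or_lt nb t j htlt hj,
                by dsimp only; omega, by dsimp only; omega, ?_⟩
              intro v' hv'
              dsimp only at hv' ⊢
              exact hnewg j hj hfree v' hv'
          have hJS' : pvJS w b W nb (pvKup k (i, t) c) (seen ++ [(i, t)])
              ((List.range nb).foldl
              (fun hh j => if t &&& (1 <<< j) = 0 then
                pvPush (c + pvDis w b i j, i + 1, t ||| (1 <<< j)) hh else hh) rest) := by
            intro s hs
            rcases (hmemS' s).mp hs with hsold | rfl
            · have hsne : s ≠ (i, t) := fun hh => hseen (hh ▸ hsold)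
              obtain ⟨h1, h2, hclause⟩ := hJS s hsold
              refine ⟨h1, h2, ?_⟩
              intro j hj hfree
              rcases hclause j hj hfree with ⟨hm2, hk2⟩ | ⟨hnm, hent⟩
              · have hs'ne : ((s.1 + 1, s.2 ||| (1 <<< j)) : Nat × Nat) ≠ (i, t) :=
                  fun hh => hseen (hh ▸ hm2)
                refine Or.inl ⟨(hmemS' _).mpr (Or.inl hm2), ?_⟩
                rw [pvKup_ne k _ _ c hs'ne, pvKup_ne k _ _ c hsne]
                exact hk2
              · by_cases hs'it : ((s.1 + 1, s.2 ||| (1 <<< j)) : Nat × Nat) = (i, t)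
                · refine Or.inl ⟨(hmemS' _).mpr (Or.inr hs'it), ?_⟩
                  rw [hs'it, pvKup_self, pvKup_ne k _ _ c hsne]
                  have hcle : c ≤ k s + pvDis w b s.1 j := by
                    rcases List.mem_cons.mp hent with heq | hr
                    · have := congrArg (fun x : Int × Nat × Nat => x.1) heq
                      dsimp at this
                      omega
                    · exact pvLe_cost _ _ (hheadle _ hr)
                  exact hcle
                · refine Or.inr ⟨fun hh => ?_, ?_⟩
                  · rcases (hmemS' _).mp hh with hh1 | hh2
                    · exact hnm hh1
                    · exact hs'it hh2
                  · rw [pvKup_ne k _ _ c hsne]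
                    apply (hmemH' _).mpr
                    refine Or.inl ?_
                    rcases List.mem_cons.mp hent with heq | hr
                    · exfalso
                      apply hs'it
                      have := congrArg (fun x : Int × Nat × Nat => (x.2.1, x.2.2)) heq
                      simpa using this
                    · exact hr
            · refine ⟨hiltW, htlt, ?_⟩
              intro j hj hfree
              dsimp only
              have hs'ne : ((i + 1, t ||| (1 <<< j)) : Nat × Nat) ≠ (i, t) := by
                intro hh
                have := congrArg Prod.fst hh
                simp at this
              by_cases hs'm : ((i + 1, t ||| (1 <<< j)) : Nat × Nat) ∈ seen
              · refine Or.inl ⟨(hmemS' _).mpr (Or.inl hs'm), ?_⟩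
                rw [pvKup_ne k _ _ c hs'ne, pvKup_self]
                have hk3 := hJK _ hs'm (c, i, t) List.mem_cons_self
                dsimp only at hk3
                have hd0 := pvDis_nonneg w b i j
                omega
              · refine Or.inr ⟨fun hh => ?_, ?_⟩
                · rcases (hmemS' _).mp hh with hh1 | hh2
                  · exact hs'm hh1
                  · exact hs'ne hh2
                · rw [pvKup_self]
                  apply (hmemH' _).mpr
                  exact Or.inr ⟨j, List.mem_range.mpr hj, hfree, rfl⟩
          have hJK' : pvJK (pvKup k (i, t) c) (seen ++ [(i, t)])
              ((List.range nb).foldl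
              (fun hh j => if t &&& (1 <<< j) = 0 then
                pvPush (c + pvDis w b i j, i + 1, t ||| (1 <<< j)) hh else hh) rest) := by
            intro s hs e he
            rcases (hmemS' s).mp hs with hsold | rfl
            · have hsne : s ≠ (i, t) := fun hh => hseen (hh ▸ hsold)
              rw [pvKup_ne k _ _ c hsne]
              rcases (hmemH' e).mp he with hr | ⟨j, hjr, hfree, rfl⟩
              · exact hJK s hsold e (List.mem_cons_of_mem _ hr)
              · have hk3 := hJK s hsold (c, i, t) List.mem_cons_self
                dsimp only at hk3 ⊢
                have hd1 := pvDis_nonneg w b i j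
                omega
            · rw [pvKup_self]
              rcases (hmemH' e).mp he with hr | ⟨j, hjr, hfree, rfl⟩
              · exact pvLe_cost _ _ (hheadle e hr)
              · dsimp only
                have hd1 := pvDis_nonneg w b i j
                omega
          have hJW' : pvJW w b W nb ans ((List.range nb).foldl
              (fun hh j => if t &&& (1 <<< j) = 0 then
                pvPush (c + pvDis w b i j, i + 1, t ||| (1 <<< j)) hh else hh) rest)
              (seen ++ [(i, t)]) := by
            obtain ⟨e, he, hns, ve, hve, hlee⟩ := hJW
            by_cases hsame : ((e.2.1, e.2.2) : Nat × Nat) = (i, t)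
            · have he1 : e.2.1 = i := congrArg Prod.fst hsame
              have he2 : e.2.2 = t := congrArg Prod.snd hsame
              rw [he1, he2] at hve
              have hvev : ve = v := by rw [hve] at hv; exact Option.some_inj.mp hv.symm ▸ rfl
              have hce : c ≤ e.1 := by
                rcases List.mem_cons.mp he with rfl | hr
                · exact le_refl _
                · exact pvLe_cost _ _ (hheadle e hr)
              refine pvChain w b W nb ans (pvKup k (i, t) c) (seen ++ [(i, t)]) _
                hJS' hJK' (W - i) i t ((hmemS' _).mpr (Or.inr rfl)) (le_refl _) v hv ?_
              rw [pvKup_self]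
              omega
            · refine ⟨e, ?_, ?_, ve, hve, hlee⟩
              · apply (hmemH' e).mpr
                refine Or.inl ?_
                rcases List.mem_cons.mp he with rfl | hr
                · exact absurd rfl hsame
                · exact hr
              · intro hh
                rcases (hmemS' _).mp hh with hh1 | hh2
                · exact hns hh1
                · exact hsame hh2
          have hlen := pvFoldPush_length (fun j => t &&& (1 <<< j) = 0)
            (fun j => (c + pvDis w b i j, i + 1, t ||| (1 <<< j))) (List.range nb) rest
          have hcard : (seen ++ [(i, t)]).length ≤ (W + 1) * 2 ^ nb :=
            pv_card W (2 ^ nb) _ hnd'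
              (fun s hs => ⟨le_of_lt (hJS' s hs).1, (hJS' s hs).2.1⟩)
          refine ih _ _ (pvKup k (i, t) c)
            (pvFoldPush_pairwise _ _ (List.range nb) rest hrestsort)
            hJH' hJW' hJS' hJK' hnd' ?_
          rw [List.length_range] at hlen
          rw [List.length_append] at hcard ⊢
          simp only [List.length_cons] at hfuel
          simp only [List.length_singleton] at hcard ⊢
          have hfuel' : rest.length + 1 +
              ((nb + 1) * ((W + 1) * 2 ^ nb - (seen.length + 1)) + (nb + 1)) ≤ fuel + 1 := by
            have hmm : (nb + 1) * ((W + 1) * 2 ^ nb - (seen.length + 1)) + (nb + 1) =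
                (nb + 1) * ((W + 1) * 2 ^ nb - seen.length) := by
              rw [← Nat.mul_succ]
              congr 1
              omega
            rw [hmm]
            exact hfuel
          omega

-- ===== VERDICT (by name: the statement is the Claim_ definition above) =====
theorem doit_bfs_heap_spec : Claim_equal_doit_bfs_heap := by
  intro w b _hdom hpre
  obtain ⟨hWnb, -, -⟩ := hpre
  unfold Spec_doit_bfs_heap
  rw [pvAlt_eq]
  have hsome : (pvG w b b.length 0 w.length 0).isSome :=
    pvG_isSome w b b.length w.length 0 0 (by rw [pvFc_zero]; exact hWnb)
  obtain ⟨ans, hans⟩ := Option.isSome_iff_exists.mp hsome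
  rw [hans]
  simp only [Option.getD_some]
  unfold doit_bfs_heap
  apply pvLoopA_correct w b w.length b.length ans _ [(0, 0, 0)] PySem.Set.empty (fun _ => 0)
  · exact List.pairwise_singleton _ _
  · intro e he
    have he0 : e = ((0 : Int), (0 : Nat), (0 : Nat)) := by simpa using he
    subst he0
    refine ⟨by simp, by positivity, ?_, le_refl _, ?_⟩
    · rw [pvFc_zero]
      omega
    · intro v hv
      dsimp only at hv
      rw [Nat.sub_zero] at hv
      rw [hans] at hv
      have : v = ans := Option.some_inj.mp hv.symm
      omega
  · refine ⟨((0 : Int), (0 : Nat), (0 : Nat)), by simp, by simp [PySem.Set.empty], ans, ?_, by omega⟩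
    dsimp only
    rw [Nat.sub_zero]
    exact hans
  · intro s hs
    simp [PySem.Set.empty] at hs
  · intro s hs
    simp [PySem.Set.empty] at hs
  · simp [PySem.Set.empty]
  · simp only [List.length_singleton, PySem.Set.empty, List.length_nil, Nat.sub_zero]
    omega
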